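-- pv_equiv track=rewrite | github.com/ramonae86/mnist_nn | multichip_compiler.py | near_even_divide
-- ===== SOURCE A (Python) =====
-- def near_even_divide(dividend, divisor):
--     residual = dividend
--     floor_quotient = dividend // divisor
--     result = []
--     for i in range(divisor):
--         if floor_quotient * (divisor - i) == residual:
--             result.append(floor_quotient)
--             residual -= floor_quotient
--         else:
--             result.append(floor_quotient + 1)
--             residual -= floor_quotient + 1
--     return result
-- ===== SOURCE B (Python) =====
-- def near_even_divide(dividend, divisor):
--     q = dividend // divisor
--     r = dividend - q * divisor
--     return [q + 1] * r + [q] * (divisor - r)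
-- ===== Notes on version B (the rewrite author's own statement) =====
-- stated objective: simpler
-- what changed: Replaces A's per-part loop (which rechecks floor_quotient*(divisor-i)==residual each iteration) with an up-front remainder computation and direct list repetition: the first r parts are q+1, the rest are q.
import Mathlib
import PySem

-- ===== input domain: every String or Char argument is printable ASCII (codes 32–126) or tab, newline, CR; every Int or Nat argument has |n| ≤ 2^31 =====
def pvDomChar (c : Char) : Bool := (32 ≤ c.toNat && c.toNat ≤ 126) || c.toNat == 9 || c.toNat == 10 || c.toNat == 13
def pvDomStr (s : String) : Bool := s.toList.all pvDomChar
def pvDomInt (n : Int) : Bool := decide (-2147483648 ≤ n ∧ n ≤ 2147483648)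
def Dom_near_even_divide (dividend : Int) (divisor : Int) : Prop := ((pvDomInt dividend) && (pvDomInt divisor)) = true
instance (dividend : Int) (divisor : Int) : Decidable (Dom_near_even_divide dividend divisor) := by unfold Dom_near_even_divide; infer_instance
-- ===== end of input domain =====

-- B replaces A's distribute-while-you-go loop by an up-front remainder and direct list repetition (simpler).


-- ===== PORT A =====
def near_even_divide (dividend : Int) (divisor : Int) : List Int :=
  let floor_quotient := PySem.Int.floordiv dividend divisor
  ((PySem.List.pyRange 0 divisor 1).foldl
    (fun (st : Int × List Int) (i : Int) =>
      if floor_quotient * (divisor - i) = st.1 then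
        (st.1 - floor_quotient, st.2 ++ [floor_quotient])
      else
        (st.1 - (floor_quotient + 1), st.2 ++ [floor_quotient + 1]))
    (dividend, ([] : List Int))).2

-- ===== PORT B =====
def near_even_divide_alt (dividend : Int) (divisor : Int) : List Int :=
  let q := PySem.Int.floordiv dividend divisor
  let r := dividend - q * divisor
  List.replicate r.toNat (q + 1) ++ List.replicate (divisor - r).toNat q

-- ===== PRECONDITION & SPEC =====
-- Pre_ excludes divisor = 0, on which A (and B) raise ZeroDivisionError.
def Pre_near_even_divide (dividend : Int) (divisor : Int) : Prop := divisor ≠ 0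
instance (dividend : Int) (divisor : Int) : Decidable (Pre_near_even_divide dividend divisor) := by unfold Pre_near_even_divide; infer_instance
def pvWitness_near_even_divide : Int × Int := (10, 3)

def Spec_near_even_divide (dividend : Int) (divisor : Int) (out : List Int) : Prop := out = near_even_divide_alt dividend divisor
instance (dividend : Int) (divisor : Int) (out : List Int) : Decidable (Spec_near_even_divide dividend divisor out) := by unfold Spec_near_even_divide; infer_instance

-- ===== CLAIM (what is proved, stated in full; the proofs are below) =====
def Claim_equal_near_even_divide : Prop := ∀ (dividend : Int) (divisor : Int), Dom_near_even_divide dividend divisor → Pre_near_even_divide dividend divisor → Spec_near_even_divide dividend divisor (near_even_divide dividend divisor)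

-- ===== LEMMAS AND PROOFS =====

-- Result of A's loop with l iterations left and current residual.
def auxLoop (q : Int) : Nat → Int → List Int
  | 0, _ => []
  | Nat.succ l, residual =>
      if q * ((l + 1 : Nat) : Int) = residual then q :: auxLoop q l (residual - q)
      else (q + 1) :: auxLoop q l (residual - (q + 1))

lemma foldA_eq (q divisor : Int) :
    ∀ (n : Nat) (i res : Int) (acc : List Int), 0 ≤ i → (divisor - i).toNat = n →
    ((PySem.List.pyRange i divisor 1).foldl
      (fun (st : Int × List Int) (k : Int) =>
        if q * (divisor - k) = st.1 then
          (st.1 - q, st.2 ++ [q])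
        else
          (st.1 - (q + 1), st.2 ++ [q + 1]))
      (res, acc)).2 = acc ++ auxLoop q n res := by
  intro n
  induction n with
  | zero =>
      intro i res acc hi hn
      rw [PySem.List.pyRange_one_eq_nil (by omega)]
      simp [auxLoop]
  | succ n ih =>
      intro i res acc hi hn
      have hlt : i < divisor := by omega
      rw [PySem.List.pyRange_one_cons hlt]
      simp only [List.foldl_cons]
      have hdi : divisor - i = ((n + 1 : Nat) : Int) := by omega
      rw [hdi]
      simp only [auxLoop]
      split_ifs with hc
      · rw [ih (i + 1) (res - q) (acc ++ [q]) (by omega) (by omega)]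
        simp
      · rw [ih (i + 1) (res - (q + 1)) (acc ++ [q + 1]) (by omega) (by omega)]
        simp

lemma auxLoop_eq_replicate (q : Int) :
    ∀ (l r : Nat), r ≤ l →
      auxLoop q l (q * (l : Int) + (r : Int)) =
        List.replicate r (q + 1) ++ List.replicate (l - r) q := by
  intro l
  induction l with
  | zero =>
      intro r hr
      interval_cases r
      simp [auxLoop]
  | succ l ih =>
      intro r hr
      cases r with
      | zero =>
          simp only [auxLoop]
          rw [if_pos (by push_cast; ring)]
          have h1 : q * ((l + 1 : Nat) : Int) + ((0 : Nat) : Int) - q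
              = q * (l : Int) + ((0 : Nat) : Int) := by push_cast; ring
          rw [h1, ih 0 (Nat.zero_le _)]
          simp [List.replicate_succ]
      | succ r' =>
          simp only [auxLoop]
          rw [if_neg (by push_cast; omega)]
          have h1 : q * ((l + 1 : Nat) : Int) + ((r' + 1 : Nat) : Int) - (q + 1)
              = q * (l : Int) + ((r' : Nat) : Int) := by push_cast; ring
          rw [h1, ih r' (by omega)]
          have h2 : l + 1 - (r' + 1) = l - r' := by omega
          rw [h2, List.replicate_succ]
          simp

-- ===== VERDICT (by name: the statement is the Claim_ definition above) =====
theorem near_even_divide_spec : Claim_equal_near_even_divide := by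
  intro dividend divisor _ hpre
  unfold Spec_near_even_divide near_even_divide near_even_divide_alt
  simp only []
  set q := PySem.Int.floordiv dividend divisor with hq
  have hmul := PySem.Int.floordiv_mul_add_mod dividend divisor
  rw [← hq] at hmul
  have hr : dividend - q * divisor = PySem.Int.mod dividend divisor := by linarith
  rcases lt_trichotomy divisor 0 with hneg | hz | hpos
  · have hb := PySem.Int.mod_neg_bounds dividend hneg
    rw [PySem.List.pyRange_one_eq_nil (by omega)]
    have h1 : (dividend - q * divisor).toNat = 0 := by rw [hr]; omega
    have h2 : (divisor - (dividend - q * divisor)).toNat = 0 := by rw [hr]; omega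
    simp [h1, h2]
  · exact absurd hz hpre
  · have h0 : 0 ≤ PySem.Int.mod dividend divisor := PySem.Int.mod_nonneg dividend hpos
    have hlt : PySem.Int.mod dividend divisor < divisor := PySem.Int.mod_lt dividend hpos
    rw [foldA_eq q divisor divisor.toNat 0 dividend [] le_rfl (by omega)]
    have hbig : dividend = q * ((divisor.toNat : Nat) : Int) + (((dividend - q * divisor).toNat : Nat) : Int) := by
      have e1 : ((divisor.toNat : Nat) : Int) = divisor := Int.toNat_of_nonneg (le_of_lt hpos)
      have e2 : (((dividend - q * divisor).toNat : Nat) : Int) = dividend - q * divisor :=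
        Int.toNat_of_nonneg (by rw [hr]; exact h0)
      rw [e1, e2]; ring
    have haux := auxLoop_eq_replicate q divisor.toNat (dividend - q * divisor).toNat (by rw [hr]; omega)
    rw [← hbig] at haux
    rw [haux]
    have h3 : (divisor - (dividend - q * divisor)).toNat = divisor.toNat - (dividend - q * divisor).toNat := by
      rw [hr]; omega
    rw [h3]
    simp
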